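-- pv_equiv track=rewrite | github.com/scy-phy/plumber | matcher/asmregex/asmregex/PatternGenerator.py | _is_new_potential
-- ===== SOURCE A (Python) =====
-- def _is_new_potential(potentials, new):
--   for pot in potentials:
--     if pot[0] == new[0] or \
--        pot[1] == new[0] or \
--        pot[0] == new[1] or \
--        pot[1] == new[1]:
--       return False
--   return True # TODO: More finegrained pruning: trace the match (again)?
-- ===== SOURCE B (Python) =====
-- def _found(a, x):
--   # hand-written binary search for membership in a sorted list
--   lo, hi = 0, len(a)
--   while lo < hi:
--     mid = (lo + hi) // 2
--     if a[mid] < x: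
--       lo = mid + 1
--     elif x < a[mid]:
--       hi = mid
--     else:
--       return True
--   return False
--
-- def _is_new_potential(potentials, new):
--   ends = sorted(e for pot in potentials for e in (pot[0], pot[1]))
--   return not (_found(ends, new[0]) or _found(ends, new[1]))
-- ===== Notes on version B (the rewrite author's own statement) =====
-- stated objective: alternative
-- what changed: Replaces A's per-pair four-way OR scan with early return by sorting all pair endpoints once and deciding each of new's two endpoints by a hand-written binary search over the sorted list.
import Mathlib
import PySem

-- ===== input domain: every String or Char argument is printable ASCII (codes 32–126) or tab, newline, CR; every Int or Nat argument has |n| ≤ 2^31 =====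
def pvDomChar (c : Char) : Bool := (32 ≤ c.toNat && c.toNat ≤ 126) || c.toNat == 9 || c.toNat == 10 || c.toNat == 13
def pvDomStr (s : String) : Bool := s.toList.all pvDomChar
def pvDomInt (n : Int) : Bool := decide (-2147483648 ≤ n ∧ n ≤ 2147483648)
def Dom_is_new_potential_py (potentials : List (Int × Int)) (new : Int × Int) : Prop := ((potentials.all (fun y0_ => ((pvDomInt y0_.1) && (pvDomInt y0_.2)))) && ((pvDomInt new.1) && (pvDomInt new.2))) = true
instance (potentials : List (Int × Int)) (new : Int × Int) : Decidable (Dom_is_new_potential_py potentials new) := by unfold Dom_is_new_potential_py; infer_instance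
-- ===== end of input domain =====

-- B sorts all pair endpoints once and decides each of new's endpoints by binary
-- search over the sorted list, instead of A's per-pair four-way OR scan with
-- early return (objective: alternative).

-- ===== PORT A =====
def is_new_potential_py (potentials : List (Int × Int)) (new : Int × Int) : Bool :=
  match potentials with
  | [] => true
  | pot :: rest =>
    if pot.1 == new.1 || pot.2 == new.1 || pot.1 == new.2 || pot.2 == new.2 then
      false
    else
      is_new_potential_py rest new

-- ===== PORT B =====
-- Source B's hand-written binary search `_found` (a[mid] is always in range: lo < hi ≤ len a)
def pvFound (a : List Int) (x : Int) (lo hi : Nat) : Bool :=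
  if _h : lo < hi then
    let mid := (lo + hi) / 2
    let v := a.getD mid 0
    if v < x then pvFound a x (mid + 1) hi
    else if x < v then pvFound a x lo mid
    else true
  else false
termination_by hi - lo
decreasing_by all_goals omega

def is_new_potential_py_alt (potentials : List (Int × Int)) (new : Int × Int) : Bool :=
  let ends := PySem.List.sorted (potentials.flatMap (fun pot => [pot.1, pot.2])) (fun x => x) false
  !(pvFound ends new.1 0 ends.length || pvFound ends new.2 0 ends.length)

-- ===== PRECONDITION & SPEC =====
def Spec_is_new_potential_py (potentials : List (Int × Int)) (new : Int × Int) (out : Bool) : Prop := out = is_new_potential_py_alt potentials new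
instance (potentials : List (Int × Int)) (new : Int × Int) (out : Bool) : Decidable (Spec_is_new_potential_py potentials new out) := by unfold Spec_is_new_potential_py; infer_instance

-- ===== CLAIM (what is proved, stated in full; the proofs are below) =====
def Claim_equal_is_new_potential_py : Prop := ∀ (potentials : List (Int × Int)) (new : Int × Int), Dom_is_new_potential_py potentials new → Spec_is_new_potential_py potentials new (is_new_potential_py potentials new)

-- ===== LEMMAS AND PROOFS =====

-- binary search on a (≤)-sorted prefix range finds exactly the indices holding x
lemma pvFound_iff (a : List Int) (x : Int) :
    ∀ (lo hi : Nat), a.Pairwise (· ≤ ·) → hi ≤ a.length →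
      (pvFound a x lo hi = true ↔ ∃ i, lo ≤ i ∧ i < hi ∧ a.getD i 0 = x) := by
  intro lo hi
  induction hlt : hi - lo using Nat.strong_induction_on generalizing lo hi with
  | _ n ih =>
    intro hsort hhi
    rw [pvFound]
    split_ifs with h
    · simp only
      have hmidlt : (lo + hi) / 2 < hi := by omega
      have hmidge : lo ≤ (lo + hi) / 2 := by omega
      have hmidlen : (lo + hi) / 2 < a.length := by omega
      have hmono : ∀ i j, i < a.length → j < a.length → i ≤ j → a.getD i 0 ≤ a.getD j 0 := by
        intro i j hi' hj' hij
        rcases Nat.lt_or_eq_of_le hij with hlt' | rfl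
        · have := (List.pairwise_iff_getElem.mp hsort) i j hi' hj' hlt'
          rw [List.getD_eq_getElem a 0 hi', List.getD_eq_getElem a 0 hj']
          exact this
        · exact le_refl _
      set mid := (lo + hi) / 2 with hmid
      split_ifs with hv1 hv2
      · rw [ih (hi - (mid + 1)) (by omega) (mid + 1) hi rfl hsort hhi]
        constructor
        · rintro ⟨i, h1, h2, h3⟩; exact ⟨i, by omega, h2, h3⟩
        · rintro ⟨i, h1, h2, h3⟩
          refine ⟨i, by_contra fun hc => ?_, h2, h3⟩
          have hile : i ≤ mid := by omega
          have := hmono i mid (by omega) hmidlen hile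
          rw [h3] at this
          omega
      · rw [ih (mid - lo) (by omega) lo mid rfl hsort (by omega)]
        constructor
        · rintro ⟨i, h1, h2, h3⟩; exact ⟨i, h1, by omega, h3⟩
        · rintro ⟨i, h1, h2, h3⟩
          refine ⟨i, h1, by_contra fun hc => ?_, h3⟩
          have hile : mid ≤ i := by omega
          have := hmono mid i hmidlen (by omega) hile
          rw [h3] at this
          omega
      · have hval : a.getD mid 0 = x := le_antisymm (not_lt.mp hv2) (not_lt.mp hv1)
        exact ⟨fun _ => ⟨mid, hmidge, hmidlt, hval⟩, fun _ => rfl⟩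
    · constructor
      · intro hc; exact absurd hc (by simp)
      · rintro ⟨i, h1, h2, _⟩; omega

-- pvFound over the whole sorted list decides membership
lemma pvFound_eq_mem (a : List Int) (x : Int) (hsort : a.Pairwise (· ≤ ·)) :
    pvFound a x 0 a.length = decide (x ∈ a) := by
  rw [Bool.eq_iff_iff, decide_eq_true_eq, pvFound_iff a x 0 a.length hsort le_rfl]
  constructor
  · rintro ⟨i, _, hlt, hgi⟩
    rw [List.getD_eq_getElem a 0 hlt] at hgi
    exact hgi ▸ List.getElem_mem hlt
  · intro hx
    obtain ⟨i, hi, hgi⟩ := List.getElem_of_mem hx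
    exact ⟨i, Nat.zero_le _, hi, by rw [List.getD_eq_getElem a 0 hi, hgi]⟩

-- A's early-return scan equals "no pair hits either endpoint"
lemma portA_eq_not_any (potentials : List (Int × Int)) (new : Int × Int) :
    is_new_potential_py potentials new =
      !(potentials.any fun p => p.1 == new.1 || p.2 == new.1 || p.1 == new.2 || p.2 == new.2) := by
  induction potentials with
  | nil => rfl
  | cons p rest ih =>
    simp only [is_new_potential_py, List.any_cons]
    split_ifs with h
    · simp [h]
    · simp [ih, h]

-- scanning for either endpoint equals membership of that endpoint in the flattened list
lemma any_eq_mem_flat (potentials : List (Int × Int)) (x : Int) :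
    (potentials.any fun p => p.1 == x || p.2 == x) =
      decide (x ∈ potentials.flatMap fun pot => [pot.1, pot.2]) := by
  rw [Bool.eq_iff_iff, decide_eq_true_eq, List.any_eq_true]
  simp only [List.mem_flatMap, Bool.or_eq_true, beq_iff_eq, List.mem_cons, List.not_mem_nil,
    or_false]
  constructor
  · rintro ⟨p, hp, h | h⟩ <;> exact ⟨p, hp, by simp [h]⟩
  · rintro ⟨p, hp, h | h⟩ <;> exact ⟨p, hp, by simp [h]⟩

-- the four-way disjunction over the list splits into two two-way scans
lemma any_split (potentials : List (Int × Int)) (new : Int × Int) :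
    (potentials.any fun p => p.1 == new.1 || p.2 == new.1 || p.1 == new.2 || p.2 == new.2) =
      ((potentials.any fun p => p.1 == new.1 || p.2 == new.1) ||
        (potentials.any fun p => p.1 == new.2 || p.2 == new.2)) := by
  induction potentials with
  | nil => rfl
  | cons p rest ih =>
    simp only [List.any_cons, ih]
    cases h1 : (p.1 == new.1) <;> cases h2 : (p.2 == new.1) <;>
      cases h3 : (p.1 == new.2) <;> cases h4 : (p.2 == new.2) <;> simp

-- ===== VERDICT (by name: the statement is the Claim_ definition above) =====
theorem is_new_potential_py_spec : Claim_equal_is_new_potential_py := by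
  intro potentials new _
  unfold Spec_is_new_potential_py is_new_potential_py_alt
  simp only []
  set flat := potentials.flatMap (fun pot => [pot.1, pot.2]) with hflat
  set ends := PySem.List.sorted flat (fun x => x) false with hends
  have hsort : ends.Pairwise (· ≤ ·) := PySem.List.sorted_pairwise flat (fun x => x)
  have hmem : ∀ x : Int, decide (x ∈ ends) = decide (x ∈ flat) := by
    intro x; rw [decide_eq_decide]; exact PySem.List.mem_sorted flat (fun x => x) false x
  rw [portA_eq_not_any, pvFound_eq_mem ends new.1 hsort, pvFound_eq_mem ends new.2 hsort,
    hmem, hmem, ← any_eq_mem_flat, ← any_eq_mem_flat, any_split]
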